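-- pv_equiv track=rewrite | github.com/JoonBeomLee/Algorithm_Python | site/PROGRAMMERS/src/python/스킬테스트/level02/더맵게.py | solution
-- ===== SOURCE A (Python) =====
-- def check_scoville(scov_arr, k):
--     for scov in scov_arr:
--         if scov <= k:
--             return False
--
--     return True
--
-- def solution(scoville, K):
--     mix_count = 0
--
--     while True:
--         # 예외처리
--         # 개수는 적은데
--         # k조건은 만족시키지 못할 떄 -1
--         if len(scoville) <= 1 and not check_scoville(scoville, K):
--             mix_count = -1
--             break
--
--         # loop 제한
--         if check_scoville(scoville, K): break
--
--         # 최소 스코빌 지수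
--         min_scoville = min(scoville)
--
--         # 최소 스코빌 지수 pop
--         min_idx_scoville = scoville.index(min_scoville)
--         del scoville[min_idx_scoville]
--
--         # 2번째 적은 스코빌 지수
--         next_min_scoville = min(scoville)
--         next_min_idx_scoville = scoville.index(next_min_scoville)
--
--         # 1_scov + (2_scov * 2)
--         scoville[next_min_idx_scoville] = min_scoville + (next_min_scoville * 2)
--
--         # mix_count ++
--         mix_count += 1
--
--     return mix_count
-- ===== SOURCE B (Python) =====
-- # Alternative: one sort up front, then keep the pot sorted with a single ordered
-- # insertion per mix (A rescans with min/index/del several times per mix).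
-- # Return-value equivalence only: A mutates the caller's list in place, B does not.
-- def solution(scoville, K):
--     q = sorted(scoville)
--     count = 0
--     while q and q[0] <= K:
--         if len(q) == 1:
--             return -1
--         v = q[0] + 2 * q[1]
--         rest = q[2:]
--         i = 0
--         while i < len(rest) and rest[i] < v:
--             i += 1
--         rest.insert(i, v)
--         q = rest
--         count += 1
--     return count
-- ===== Notes on version B (the rewrite author's own statement) =====
-- stated objective: alternative
-- what changed: B sorts the list once and maintains sortedness with a single ordered insertion per mix, replacing A's per-iteration min/index/del/min/index rescans of an unsorted list.
import Mathlib
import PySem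

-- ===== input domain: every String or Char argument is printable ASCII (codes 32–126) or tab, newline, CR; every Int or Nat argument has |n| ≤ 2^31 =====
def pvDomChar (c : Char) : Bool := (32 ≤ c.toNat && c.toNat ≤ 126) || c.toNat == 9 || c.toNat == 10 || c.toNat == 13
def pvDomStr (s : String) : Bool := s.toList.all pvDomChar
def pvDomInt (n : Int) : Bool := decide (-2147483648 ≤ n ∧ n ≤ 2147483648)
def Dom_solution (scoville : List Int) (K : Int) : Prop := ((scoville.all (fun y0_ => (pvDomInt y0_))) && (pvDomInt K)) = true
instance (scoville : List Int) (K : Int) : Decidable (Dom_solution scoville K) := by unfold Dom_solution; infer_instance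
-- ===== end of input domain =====

-- B sorts the pot once and keeps it sorted with one ordered insertion per mix, instead of
-- A's repeated min/index/del scans; equivalence is about the RETURN value only (A mutates
-- the caller's list in place, B does not).


-- ===== PORT A =====
-- helper check_scoville: the for-loop with early `return False`
def checkScov (scovArr : List Int) (k : Int) : Bool :=
  match scovArr with
  | [] => true
  | scov :: t => if scov ≤ k then false else checkScov t k

-- index? yields an in-range index (used for termination of the while-loop port)
theorem idx_lt_of_index? {l : List Int} {v : Int} {i : Nat}
    (h : PySem.List.index? l v = some i) : i < l.length :=
  (PySem.List.getElem_of_index?_eq_some h).1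

-- the `while True` loop of A; `none` branches are unreachable (min/index of a
-- nonempty list that contains the value), returning 0 there is never exercised
def solutionLoop (scoville : List Int) (K : Int) (mixCount : Int) : Int :=
  if scoville.length ≤ 1 ∧ checkScov scoville K = false then -1
  else if checkScov scoville K = true then mixCount
  else
    match PySem.List.min? scoville (fun x => x) with
    | none => 0
    | some minScoville =>
      match _hi : PySem.List.index? scoville minScoville with
      | none => 0
      | some minIdx =>
        match PySem.List.min? (scoville.eraseIdx minIdx) (fun x => x) with
        | none => 0
        | some nextMin =>
          match PySem.List.index? (scoville.eraseIdx minIdx) nextMin with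
          | none => 0
          | some nextIdx =>
            solutionLoop ((scoville.eraseIdx minIdx).set nextIdx (minScoville + nextMin * 2)) K (mixCount + 1)
termination_by scoville.length
decreasing_by
  simp only [List.length_set]
  have := idx_lt_of_index? _hi
  rw [List.length_eraseIdx_of_lt this]
  omega

def solution (scoville : List Int) (K : Int) : Int :=
  solutionLoop scoville K 0

-- ===== PORT B =====
-- Source B's inner while loop: walk past the strictly smaller prefix, insert v there
def insertSorted (q : List Int) (v : Int) : List Int :=
  match q with
  | [] => [v]
  | x :: t => if x < v then x :: insertSorted t v else v :: x :: t

theorem length_insertSorted (q : List Int) (v : Int) :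
    (insertSorted q v).length = q.length + 1 := by
  induction q with
  | nil => rfl
  | cons x t ih => simp only [insertSorted]; split <;> simp [ih]

-- Source B's outer while loop over the sorted pot
def altLoop (q : List Int) (K : Int) (count : Int) : Int :=
  match q with
  | [] => count
  | a :: t =>
    if a ≤ K then
      match t with
      | [] => -1
      | b :: rest => altLoop (insertSorted rest (a + 2 * b)) K (count + 1)
    else count
termination_by q.length
decreasing_by simp [length_insertSorted]

def solution_alt (scoville : List Int) (K : Int) : Int :=
  altLoop (PySem.List.sorted scoville (fun x => x)) K 0

-- ===== PRECONDITION & SPEC =====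
def Spec_solution (scoville : List Int) (K : Int) (out : Int) : Prop := out = solution_alt scoville K
instance (scoville : List Int) (K : Int) (out : Int) : Decidable (Spec_solution scoville K out) := by unfold Spec_solution; infer_instance

-- ===== CLAIM (what is proved, stated in full; the proofs are below) =====
def Claim_equal_solution : Prop := ∀ (scoville : List Int) (K : Int), Dom_solution scoville K → Spec_solution scoville K (solution scoville K)

-- ===== LEMMAS AND PROOFS =====

theorem checkScov_iff (l : List Int) (K : Int) :
    checkScov l K = true ↔ ∀ x ∈ l, K < x := by
  induction l with
  | nil => simp [checkScov]
  | cons x t ih =>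
    simp only [checkScov, List.mem_cons]
    split
    · constructor
      · intro h; cases h
      · intro h; have := h x (Or.inl rfl); omega
    · rw [ih]
      constructor
      · intro h y hy; rcases hy with rfl | hy
        · omega
        · exact h y hy
      · intro h y hy; exact h y (Or.inr hy)

theorem eraseIdx_of_index? {l : List Int} {v : Int} {i : Nat}
    (h : PySem.List.index? l v = some i) : l.eraseIdx i = l.erase v := by
  rw [PySem.List.index?_eq_idxOf?] at h
  induction l generalizing i with
  | nil => simp [List.idxOf?] at h
  | cons x t ih =>
    by_cases hx : x = v
    · subst hx; simp [List.idxOf?_cons, BEq.rfl] at h; subst h; simp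
    · rw [List.idxOf?_cons] at h
      simp [beq_iff_eq, hx] at h
      obtain ⟨j, hj, rfl⟩ := h
      simp [List.eraseIdx, hx, ih hj]

theorem set_perm_cons_eraseIdx :
    ∀ (j : Nat) (l : List Int) (w : Int), j < l.length →
      (l.set j w).Perm (w :: l.eraseIdx j) := by
  intro j
  induction j with
  | zero =>
    intro l w h
    cases l with
    | nil => simp at h
    | cons x t => simp
  | succ j ih =>
    intro l w h
    cases l with
    | nil => simp at h
    | cons x t =>
      simp only [List.set, List.eraseIdx]
      exact (List.Perm.cons x (ih t w (by simpa using h))).trans (List.Perm.swap w x _)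

-- the head of a sorted permutation is the min value of the list
theorem min_head_sorted {l : List Int} {a : Int} {t : List Int}
    (hperm : (a :: t).Perm l) (hsort : (a :: t).Pairwise (· ≤ ·)) {m : Int}
    (hm : PySem.List.min? l (fun x => x) = some m) : m = a := by
  have hma : m ≤ a := PySem.List.min?_isMin hm a (hperm.mem_iff.mp (by simp))
  have hml : m ∈ l := PySem.List.min?_mem hm
  have hmq : m ∈ a :: t := hperm.mem_iff.mpr hml
  rcases List.mem_cons.mp hmq with rfl | hmt
  · rfl
  · have := (List.pairwise_cons.mp hsort).1 m hmt
    omega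

theorem insertSorted_perm (q : List Int) (v : Int) : (insertSorted q v).Perm (v :: q) := by
  induction q with
  | nil => rfl
  | cons x t ih =>
    simp only [insertSorted]
    split
    · exact (List.Perm.cons x ih).trans (List.Perm.swap v x t)
    · rfl

theorem insertSorted_pairwise {q : List Int} (v : Int) (h : q.Pairwise (· ≤ ·)) :
    (insertSorted q v).Pairwise (· ≤ ·) := by
  induction q with
  | nil => simp [insertSorted]
  | cons x t ih =>
    simp only [insertSorted]
    rcases List.pairwise_cons.mp h with ⟨hx, ht⟩
    split
    · rename_i hlt
      refine List.pairwise_cons.mpr ⟨?_, ih ht⟩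
      intro y hy
      rcases List.mem_cons.mp ((insertSorted_perm t v).mem_iff.mp hy) with rfl | hyt
      · omega
      · exact hx y hyt
    · rename_i hge
      refine List.pairwise_cons.mpr ⟨?_, h⟩
      intro y hy
      rcases List.mem_cons.mp hy with rfl | hyt
      · omega
      · have := hx y hyt; omega

-- main loop equivalence: A's loop on any list equals B's loop on a sorted permutation
theorem loop_eq : ∀ (n : Nat) (l q : List Int) (K mix : Int),
    l.length = n → q.Perm l → q.Pairwise (· ≤ ·) →
    solutionLoop l K mix = altLoop q K mix := by
  intro n
  induction n with
  | zero =>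
    intro l q K mix hlen hperm _
    have hl : l = [] := List.length_eq_zero_iff.mp hlen
    subst hl
    have hq : q = [] := List.Perm.eq_nil hperm
    subst hq
    rw [solutionLoop, altLoop]
    simp [checkScov]
  | succ n ih =>
    intro l q K mix hlen hperm hsort
    cases q with
    | nil => exact absurd (hperm.symm.eq_nil) (by intro h; simp [h] at hlen)
    | cons a t =>
      by_cases haK : a ≤ K
      · -- min ≤ K: not done yet
        have hcheck : checkScov l K = false := by
          rw [Bool.eq_false_iff]
          intro hc
          have := (checkScov_iff l K).mp hc a (hperm.mem_iff.mp (by simp))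
          omega
        cases t with
        | nil =>
          -- single element, fails: -1
          have hl1 : l.length = 1 := by
            have := hperm.length_eq; simpa using this.symm
          rw [solutionLoop, altLoop]
          simp [hl1, hcheck, haK]
        | cons b rest =>
          have hlen2 : 2 ≤ l.length := by
            have := hperm.length_eq; simp at this; omega
          rw [solutionLoop]
          rw [if_neg (by rw [hcheck]; omega), if_neg (by simp [hcheck])]
          split
          · rename_i h
            rw [PySem.List.min?_eq_none_iff] at h
            simp [h] at hlen2
          · rename_i m hm
            have hma : m = a := min_head_sorted hperm hsort hm
            subst hma
            split
            · rename_i h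
              rw [PySem.List.index?_eq_none_iff] at h
              exact absurd (PySem.List.min?_mem hm) h
            · rename_i i hi
              have hl1erase : l.eraseIdx i = l.erase m := eraseIdx_of_index? hi
              have hperm1 : (b :: rest).Perm (l.eraseIdx i) := by
                rw [hl1erase]
                have := hperm.erase m
                simpa using this
              have hsort1 : (b :: rest).Pairwise (· ≤ ·) := (List.pairwise_cons.mp hsort).2
              have hlen1 : (l.eraseIdx i).length = n := by
                rw [List.length_eraseIdx_of_lt (idx_lt_of_index? hi)]; omega
              split
              · rename_i h
                rw [PySem.List.min?_eq_none_iff] at h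
                rw [h] at hperm1
                have := hperm1.eq_nil; simp at this
              · rename_i m2 hm2
                have hm2b : m2 = b := min_head_sorted hperm1 hsort1 hm2
                subst hm2b
                split
                · rename_i h
                  rw [PySem.List.index?_eq_none_iff] at h
                  exact absurd (PySem.List.min?_mem hm2) h
                · rename_i j hj
                  have hperm2 : (insertSorted rest (m + 2 * m2)).Perm
                      ((l.eraseIdx i).set j (m + m2 * 2)) := by
                    have h1 := set_perm_cons_eraseIdx j (l.eraseIdx i) (m + m2 * 2)
                      (idx_lt_of_index? hj)
                    have h2 : ((l.eraseIdx i).eraseIdx j).Perm rest := by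
                      rw [eraseIdx_of_index? hj]
                      have := hperm1.erase m2
                      simpa using this.symm
                    have h3 : ((l.eraseIdx i).set j (m + m2 * 2)).Perm ((m + m2 * 2) :: rest) :=
                      h1.trans (List.Perm.cons _ h2)
                    have h3' : ((l.eraseIdx i).set j (m + m2 * 2)).Perm ((m + 2 * m2) :: rest) := by
                      rw [show m + 2 * m2 = m + m2 * 2 by ring]; exact h3
                    exact (insertSorted_perm rest (m + 2 * m2)).trans h3'.symm
                  rw [altLoop.eq_def]
                  simp only [if_pos haK]
                  exact ih ((l.eraseIdx i).set j (m + m2 * 2)) (insertSorted rest (m + 2 * m2)) K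
                    (mix + 1) (by rw [List.length_set]; exact hlen1) hperm2
                    (insertSorted_pairwise _ (List.pairwise_cons.mp hsort1).2)
      · -- head of sorted perm > K: everything > K, both return the count
        have hcheck : checkScov l K = true := by
          rw [checkScov_iff]
          intro x hx
          rcases List.mem_cons.mp (hperm.mem_iff.mpr hx) with rfl | hxt
          · omega
          · have := (List.pairwise_cons.mp hsort).1 x hxt; omega
        rw [solutionLoop, altLoop.eq_def]
        simp [hcheck, haK]

-- ===== VERDICT (by name: the statement is the Claim_ definition above) =====
theorem solution_spec : Claim_equal_solution := by
  intro scoville K _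
  unfold Spec_solution solution solution_alt
  exact loop_eq scoville.length scoville (PySem.List.sorted scoville (fun x => x)) K 0
    rfl (PySem.List.sorted_perm scoville (fun x => x) false)
    (PySem.List.sorted_pairwise scoville (fun x => x))
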